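-- pv_equiv track=rewrite | github.com/charlesgiry/advent_of_code | y2023/days/day14.py | move_stone_x_axis
-- ===== SOURCE A (Python) =====
-- def move_stone_x_axis(array: list[str], right: bool):
--     """
--     Move all the stones either left or right
--     """
--     len_y = len(array)
--     len_x = len(array[0])
--
--     signs = [[] for _ in range(len_y)]
--
--     for y in range(len_y):
--         for x in range(len_x):
--             if array[y][x] == 'O':
--                 signs[y].append(('O', x))
--             if array[y][x] == '#':
--                 signs[y].append(('#', x))
--
--     new_array = [
--         '' for i in range(len_y)
--     ]
--
--     for i in range(len_y):
--         o_count = 0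
--         previous_sharp = 0
--         for type, x in signs[i]:
--             if type == 'O':
--                 o_count += 1
--
--             if type == '#':
--                 dot_count = x - previous_sharp - o_count
--                 if right:
--                     new_array[i] = new_array[i] + '.' * dot_count + 'O' * o_count + '#'
--                 else:
--                     new_array[i] = new_array[i] + 'O' * o_count + '.' * dot_count + '#'
--
--                 o_count = 0
--                 previous_sharp = x + 1
--
--         rest = len_x - len(new_array[i])
--         dot_count = rest - o_count
--         if right:
--             new_array[i] = new_array[i] + '.' * dot_count + 'O' * o_count
--         else:
--             new_array[i] = new_array[i] + 'O' * o_count + '.' * dot_count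
--     return new_array
-- ===== SOURCE B (Python) =====
-- def move_stone_x_axis(array: list[str], right: bool):
--     """
--     Move all the stones either left or right
--     """
--     len_x = len(array[0])
--     new_array = []
--     for row in array:
--         parts = []
--         for seg in row[:len_x].split('#'):
--             n = seg.count('O')
--             dots = '.' * (len(seg) - n)
--             parts.append(dots + 'O' * n if right else 'O' * n + dots)
--         new_array.append('#'.join(parts))
--     return new_array
-- ===== Notes on version B (the rewrite author's own statement) =====
-- stated objective: simpler
-- what changed: Replaced A's two-phase scheme (collect ('O',x)/('#',x) position pairs per row, then replay them with previous_sharp/o_count index arithmetic) by a direct per-row split on '#', counting the 'O's in each wall-free segment and rejoining the rendered segments with '#'.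
import Mathlib
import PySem

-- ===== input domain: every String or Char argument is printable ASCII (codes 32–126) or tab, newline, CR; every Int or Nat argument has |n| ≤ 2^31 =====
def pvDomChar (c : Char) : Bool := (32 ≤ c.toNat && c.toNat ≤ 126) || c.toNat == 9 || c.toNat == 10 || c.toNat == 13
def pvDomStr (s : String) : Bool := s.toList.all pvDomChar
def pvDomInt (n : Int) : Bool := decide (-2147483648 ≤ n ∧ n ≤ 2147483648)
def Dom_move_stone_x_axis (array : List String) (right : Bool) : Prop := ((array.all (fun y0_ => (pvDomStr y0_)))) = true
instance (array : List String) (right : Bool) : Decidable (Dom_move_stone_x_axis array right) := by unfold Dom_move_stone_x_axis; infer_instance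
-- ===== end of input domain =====

-- B replaces A's two-phase "record (sign, x) positions, then replay with index arithmetic" by a
-- direct per-row split on '#' / count 'O's per segment / rejoin — simpler, same cost.

-- ===== PORT A =====
-- signs[y]: the ('O', x) / ('#', x) entries collected for one row (inner x-loop of A's first loop)
def pvSignsRow (row : List Char) (len_x : Nat) : List (Char × Nat) :=
  (List.range len_x).foldl (fun acc x =>
    let c := row.getD x ' '
    let acc := if c = 'O' then acc ++ [('O', x)] else acc
    if c = '#' then acc ++ [('#', x)] else acc) []

-- one step of A's second loop: state = (new_array[i], o_count, previous_sharp)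
def pvAStep (right : Bool) (st : List Char × Nat × Nat) (p : Char × Nat) : List Char × Nat × Nat :=
  let o := if p.1 = 'O' then st.2.1 + 1 else st.2.1
  if p.1 = '#' then
    let dot := p.2 - st.2.2 - o
    (st.1 ++ (if right then List.replicate dot '.' ++ List.replicate o 'O'
              else List.replicate o 'O' ++ List.replicate dot '.') ++ ['#'], 0, p.2 + 1)
  else (st.1, o, st.2.2)

-- A's second loop body for row i, including the trailing "rest" emission
def pvARow (right : Bool) (len_x : Nat) (signs : List (Char × Nat)) : List Char :=
  let st := signs.foldl (pvAStep right) ([], 0, 0)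
  let dot := (len_x - st.1.length) - st.2.1
  st.1 ++ (if right then List.replicate dot '.' ++ List.replicate st.2.1 'O'
           else List.replicate st.2.1 'O' ++ List.replicate dot '.')

def move_stone_x_axis (array : List String) (right : Bool) : List String :=
  match array with
  | [] => []  -- Python raises IndexError here (len(array[0])); excluded by Pre_
  | a0 :: _ =>
    let len_x := a0.toList.length
    let signs := array.map (fun row => pvSignsRow row.toList len_x)
    signs.map (fun s => String.ofList (pvARow right len_x s))

-- ===== PORT B =====
-- render one wall-free segment: n 'O's packed to the chosen side, dots elsewhere
def pvBSeg (right : Bool) (seg : List Char) : List Char :=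
  let n := seg.count 'O'
  let dots := List.replicate (seg.length - n) '.'
  if right then dots ++ List.replicate n 'O' else List.replicate n 'O' ++ dots

def move_stone_x_axis_alt (array : List String) (right : Bool) : List String :=
  match array with
  | [] => []  -- Python raises IndexError here (len(array[0])); excluded by Pre_
  | a0 :: _ =>
    let len_x := a0.toList.length
    array.map (fun row =>
      String.ofList (List.intercalate ['#'] (((row.toList.take len_x).splitOn '#').map (pvBSeg right))))

-- ===== PRECONDITION & SPEC =====
-- Pre_ excludes exactly the inputs where A raises IndexError: the empty grid (array[0]) and
-- grids with a row shorter than the first row (array[y][x] for x < len(array[0])).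
def Pre_move_stone_x_axis (array : List String) (right : Bool) : Prop :=
  array ≠ [] ∧ ∀ row ∈ array, (array.headD "").toList.length ≤ row.toList.length
instance (array : List String) (right : Bool) : Decidable (Pre_move_stone_x_axis array right) := by
  unfold Pre_move_stone_x_axis; infer_instance

def pvWitness_move_stone_x_axis : List String × Bool := (["O.#.O", ".O.OO"], true)

def Spec_move_stone_x_axis (array : List String) (right : Bool) (out : List String) : Prop := out = move_stone_x_axis_alt array right
instance (array : List String) (right : Bool) (out : List String) : Decidable (Spec_move_stone_x_axis array right out) := by unfold Spec_move_stone_x_axis; infer_instance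

-- ===== CLAIM (what is proved, stated in full; the proofs are below) =====
def Claim_equal_move_stone_x_axis : Prop := ∀ (array : List String) (right : Bool), Dom_move_stone_x_axis array right → Pre_move_stone_x_axis array right → Spec_move_stone_x_axis array right (move_stone_x_axis array right)

-- ===== LEMMAS AND PROOFS =====

-- the one rendered segment: o stones, total length k (o ≤ k)
def pvEmit (right : Bool) (o k : Nat) : List Char :=
  if right then List.replicate (k - o) '.' ++ List.replicate o 'O'
  else List.replicate o 'O' ++ List.replicate (k - o) '.'

-- reference rendering of a row suffix t, with a pending wall-free prefix of o 'O's and length k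
def pvR (right : Bool) (o k : Nat) : List Char → List Char
  | [] => pvEmit right o k
  | c :: cs =>
    if c = '#' then pvEmit right o k ++ '#' :: pvR right 0 0 cs
    else if c = 'O' then pvR right (o + 1) (k + 1) cs
    else pvR right o (k + 1) cs

-- signs of a row suffix whose first char sits at absolute position i
def pvSigs : List Char → Nat → List (Char × Nat)
  | [], _ => []
  | c :: cs, i =>
    (if c = 'O' then [('O', i)] else if c = '#' then [('#', i)] else []) ++ pvSigs cs (i + 1)

theorem pvSigs_append (s t : List Char) (i : Nat) :
    pvSigs (s ++ t) i = pvSigs s i ++ pvSigs t (i + s.length) := by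
  induction s generalizing i with
  | nil => simp [pvSigs]
  | cons c cs ih =>
      simp only [List.cons_append, pvSigs, ih, List.append_assoc, List.length_cons]
      have h : i + 1 + cs.length = i + (cs.length + 1) := by omega
      rw [h]

theorem pvSignsRow_eq_sigs (row : List Char) (n : Nat) (h : n ≤ row.length) :
    pvSignsRow row n = pvSigs (row.take n) 0 := by
  induction n with
  | zero => simp [pvSignsRow, pvSigs]
  | succ n ih =>
      have hn : n < row.length := by omega
      rw [pvSignsRow, List.range_succ, List.foldl_append, ← pvSignsRow, ih (by omega),
        List.take_add_one, List.getElem?_eq_getElem hn, pvSigs_append]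
      simp only [List.foldl_cons, List.foldl_nil, Option.toList_some, pvSigs,
        List.length_take, Nat.min_eq_left (le_of_lt hn), Nat.zero_add, List.append_nil]
      by_cases hO : row[n] = 'O'
      · simp [List.getElem?_eq_getElem hn, hO]
      · by_cases hS : row[n] = '#' <;> simp [List.getElem?_eq_getElem hn, hO, hS]

theorem pvEmit_length (right : Bool) (o k : Nat) (h : o ≤ k) : (pvEmit right o k).length = k := by
  unfold pvEmit; split <;> simp <;> omega

-- A's trailing "rest" emission, as a function of the final loop state
def pvTail (right : Bool) (L : Nat) (st : List Char × Nat × Nat) : List Char :=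
  st.1 ++ (if right then List.replicate ((L - st.1.length) - st.2.1) '.' ++ List.replicate st.2.1 'O'
           else List.replicate st.2.1 'O' ++ List.replicate ((L - st.1.length) - st.2.1) '.')

theorem pvARow_eq_tail (right : Bool) (L : Nat) (signs : List (Char × Nat)) :
    pvARow right L signs = pvTail right L (signs.foldl (pvAStep right) ([], 0, 0)) := rfl

theorem pvA_fold_eq_R (right : Bool) (t : List Char) :
    ∀ (o k : Nat) (new : List Char), o ≤ k →
    pvTail right (new.length + k + t.length)
        ((pvSigs t (new.length + k)).foldl (pvAStep right) (new, o, new.length))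
      = new ++ pvR right o k t := by
  induction t with
  | nil =>
      intro o k new h
      simp only [pvSigs, List.foldl_nil, pvTail, pvR, pvEmit, List.length_nil, Nat.add_zero]
      have hk : new.length + k - new.length - o = k - o := by omega
      rw [hk]
  | cons c cs ih =>
      intro o k new h
      by_cases hS : c = '#'
      · subst hS
        rw [show pvSigs ('#' :: cs) (new.length + k)
            = ('#', new.length + k) :: pvSigs cs (new.length + k + 1) from by simp [pvSigs]]
        rw [List.foldl_cons]
        have hstep : pvAStep right (new, o, new.length) ('#', new.length + k)
            = (new ++ pvEmit right o k ++ ['#'], 0, new.length + k + 1) := by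
          simp only [pvAStep, pvEmit]
          simp
        rw [hstep]
        have hlen : (new ++ pvEmit right o k ++ ['#']).length = new.length + k + 1 := by
          simp [pvEmit_length right o k h]; omega
        have h2 := ih 0 0 (new ++ pvEmit right o k ++ ['#']) (le_refl 0)
        rw [hlen] at h2
        simp only [Nat.add_zero] at h2
        have hL : new.length + k + ('#' :: cs).length = new.length + k + 1 + cs.length := by
          simp; omega
        rw [hL, h2, show pvR right o k ('#' :: cs)
            = pvEmit right o k ++ '#' :: pvR right 0 0 cs from by simp [pvR]]
        simp
      · by_cases hO : c = 'O'
        · subst hO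
          rw [show pvSigs ('O' :: cs) (new.length + k)
              = ('O', new.length + k) :: pvSigs cs (new.length + k + 1) from by simp [pvSigs]]
          rw [List.foldl_cons]
          have hstep : pvAStep right (new, o, new.length) ('O', new.length + k)
              = (new, o + 1, new.length) := by simp [pvAStep]
          rw [hstep]
          have h2 := ih (o + 1) (k + 1) new (by omega)
          have hL : new.length + k + ('O' :: cs).length = new.length + (k + 1) + cs.length := by
            simp; omega
          have hi : new.length + k + 1 = new.length + (k + 1) := by omega
          rw [hL, hi, h2, show pvR right o k ('O' :: cs) = pvR right (o + 1) (k + 1) cs from by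
            simp [pvR]]
        · rw [show pvSigs (c :: cs) (new.length + k) = pvSigs cs (new.length + k + 1) from by
            simp [pvSigs, hS, hO]]
          have h2 := ih o (k + 1) new (by omega)
          have hL : new.length + k + (c :: cs).length = new.length + (k + 1) + cs.length := by
            simp; omega
          have hi : new.length + k + 1 = new.length + (k + 1) := by omega
          rw [hL, hi, h2, show pvR right o k (c :: cs) = pvR right o (k + 1) cs from by
            simp [pvR, hS, hO]]

theorem pvARow_eq_R (right : Bool) (t : List Char) :
    pvARow right t.length (pvSigs t 0) = pvR right 0 0 t := by
  have := pvA_fold_eq_R right t 0 0 [] (le_refl 0)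
  simpa [pvARow_eq_tail] using this

theorem pvIntercalate_cons (a : List Char) (r : List (List Char)) (h : r ≠ []) :
    List.intercalate ['#'] (a :: r) = a ++ '#' :: List.intercalate ['#'] r := by
  cases r with
  | nil => simp at h
  | cons b rs => simp [List.intercalate, List.intersperse]

theorem pvSplitOn_cons (c : Char) (cs : List Char) :
    (c :: cs).splitOn '#'
      = if c = '#' then [] :: cs.splitOn '#' else (cs.splitOn '#').modifyHead (List.cons c) := by
  simp [List.splitOn, List.splitOnP_cons]

theorem pvSplitOn_ne_nil (cs : List Char) : cs.splitOn '#' ≠ [] :=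
  List.splitOnP_ne_nil _ _

theorem pvB_eq_R (right : Bool) (t : List Char) :
    ∀ (p : List Char),
    List.intercalate ['#'] (((t.splitOn '#').modifyHead (p ++ ·)).map (pvBSeg right))
      = pvR right (p.count 'O') p.length t := by
  induction t with
  | nil =>
      intro p
      simp [List.splitOn_nil, List.intercalate, pvBSeg, pvEmit, pvR]
  | cons c cs ih =>
      intro p
      rw [pvSplitOn_cons]
      by_cases hS : c = '#'
      · rw [if_pos hS, List.modifyHead_cons, List.map_cons,
          pvIntercalate_cons _ _ (by simp [pvSplitOn_ne_nil])]
        have hid := ih []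
        simp only [List.nil_append, List.count_nil, List.length_nil] at hid
        rw [show List.modifyHead (fun x => x) (cs.splitOn '#') = cs.splitOn '#' from
          congrFun List.modifyHead_id _] at hid
        subst hS
        rw [hid, show pvR right (p.count 'O') p.length ('#' :: cs)
            = pvEmit right (p.count 'O') p.length ++ '#' :: pvR right 0 0 cs from by
          simp [pvR]]
        simp [pvBSeg, pvEmit]
      · rw [if_neg hS, List.modifyHead_modifyHead]
        have hcomp : ((p ++ ·) ∘ List.cons c) = ((p ++ [c]) ++ ·) := by
          funext x; simp
        rw [hcomp, ih (p ++ [c])]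
        by_cases hO : c = 'O'
        · rw [show pvR right (p.count 'O') p.length (c :: cs)
              = pvR right (p.count 'O' + 1) (p.length + 1) cs from by
            simp [pvR, hO]]
          have h1 : (p ++ [c]).count 'O' = p.count 'O' + 1 := by simp [hO]
          have h2 : (p ++ [c]).length = p.length + 1 := by simp
          rw [h1, h2]
        · rw [show pvR right (p.count 'O') p.length (c :: cs)
              = pvR right (p.count 'O') (p.length + 1) cs from by
            simp [pvR, hS, hO]]
          have h1 : (p ++ [c]).count 'O' = p.count 'O' := by simp [hO]
          have h2 : (p ++ [c]).length = p.length + 1 := by simp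
          rw [h1, h2]

theorem pvRow_eq (right : Bool) (t : List Char) :
    pvARow right t.length (pvSigs t 0)
      = List.intercalate ['#'] ((t.splitOn '#').map (pvBSeg right)) := by
  have hb := pvB_eq_R right t []
  simp only [List.nil_append, List.count_nil, List.length_nil] at hb
  rw [show List.modifyHead (fun x => x) (t.splitOn '#') = t.splitOn '#' from
    congrFun List.modifyHead_id _] at hb
  rw [pvARow_eq_R, hb]

-- ===== VERDICT (by name: the statement is the Claim_ definition above) =====
theorem move_stone_x_axis_spec : Claim_equal_move_stone_x_axis := by
  intro array right _hdom hpre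
  unfold Spec_move_stone_x_axis
  obtain ⟨hne, hlen⟩ := hpre
  cases array with
  | nil => exact absurd rfl hne
  | cons a0 rest =>
      simp only [move_stone_x_axis, move_stone_x_axis_alt, List.map_map]
      refine List.map_congr_left ?_
      intro row hrow
      have hle : a0.toList.length ≤ row.toList.length := by
        simpa using hlen row hrow
      have ht : (row.toList.take a0.toList.length).length = a0.toList.length :=
        List.length_take_of_le hle
      simp only [Function.comp]
      rw [pvSignsRow_eq_sigs row.toList a0.toList.length hle]
      congr 1
      calc pvARow right a0.toList.length (pvSigs (row.toList.take a0.toList.length) 0)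
          = pvARow right (row.toList.take a0.toList.length).length
              (pvSigs (row.toList.take a0.toList.length) 0) := by rw [ht]
        _ = _ := pvRow_eq right _
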